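-- pv_equiv track=rewrite | github.com/eljonathas/sistemas-de-computacao-aulas | sistemas-de-numeracao/binary_to_octal.py | adjustBinaryValue
-- ===== SOURCE A (Python) =====
-- def adjustBinaryValue(value):
--     stringToList = list(value)
--     invertList = stringToList[::-1]
--
--     while len(stringToList) % 3 != 0:
--         invertList.append('0')
--         stringToList = invertList[::-1]
--
--         if(len(stringToList) % 3 == 0):
--             break
--
--     return stringToList
-- ===== SOURCE B (Python) =====
-- def adjustBinaryValue(value):
--     pad = (-len(value)) % 3
--     return ['0'] * pad + list(value)
-- ===== Notes on version B (the rewrite author's own statement) =====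
-- stated objective: simpler
-- what changed: Replaces A's reverse/append/re-reverse while-loop with a closed-form padding count pad = (-len(value)) % 3 and a single list construction.
import Mathlib
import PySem

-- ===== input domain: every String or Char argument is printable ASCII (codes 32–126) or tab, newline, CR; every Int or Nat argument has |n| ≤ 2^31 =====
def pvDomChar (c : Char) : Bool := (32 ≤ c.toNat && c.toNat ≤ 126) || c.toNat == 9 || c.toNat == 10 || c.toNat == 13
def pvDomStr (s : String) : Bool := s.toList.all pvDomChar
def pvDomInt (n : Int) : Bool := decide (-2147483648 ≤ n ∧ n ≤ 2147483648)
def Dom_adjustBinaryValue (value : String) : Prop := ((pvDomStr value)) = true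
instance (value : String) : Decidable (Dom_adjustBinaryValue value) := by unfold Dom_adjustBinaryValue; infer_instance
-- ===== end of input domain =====

-- B replaces A's reverse/append/re-reverse while-loop by the closed-form padding count
-- pad = (-len(value)) % 3 and a single list construction (objective: simpler).

-- ===== PORT A =====
-- A's while loop; state is (stringToList, invertList); [::-1] ported as List.reverse (exact).
-- The fuel argument is only a totality guard: the loop runs at most 2 iterations
-- (length % 3 reaches 0 after ≤ 2 appends), so fuel 3 is never exhausted.
def adjustBinaryValueLoop (fuel : Nat) (stringToList invertList : List Char) : List Char :=
  match fuel with
  | 0 => stringToList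
  | fuel + 1 =>
    if stringToList.length % 3 ≠ 0 then
      let invertList' := invertList ++ ['0']
      let stringToList' := invertList'.reverse
      if stringToList'.length % 3 = 0 then stringToList'
      else adjustBinaryValueLoop fuel stringToList' invertList'
    else stringToList

def adjustBinaryValue (value : String) : List String :=
  let stringToList := value.toList
  let invertList := stringToList.reverse
  (adjustBinaryValueLoop 3 stringToList invertList).map (fun c => String.ofList [c])

-- ===== PORT B =====
def adjustBinaryValue_alt (value : String) : List String :=
  let pad := PySem.Int.mod (-(value.toList.length : Int)) 3
  List.replicate pad.toNat "0" ++ value.toList.map (fun c => String.ofList [c])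

-- ===== PRECONDITION & SPEC =====
def Spec_adjustBinaryValue (value : String) (out : List String) : Prop := out = adjustBinaryValue_alt value
instance (value : String) (out : List String) : Decidable (Spec_adjustBinaryValue value out) := by unfold Spec_adjustBinaryValue; infer_instance

-- ===== CLAIM (what is proved, stated in full; the proofs are below) =====
def Claim_equal_adjustBinaryValue : Prop := ∀ (value : String), Dom_adjustBinaryValue value → Spec_adjustBinaryValue value (adjustBinaryValue value)

-- ===== LEMMAS AND PROOFS =====

-- each loop iteration prepends one '0'; at most two iterations happen, so the result is
-- replicate ((3 - len % 3) % 3) '0' ++ s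
theorem adjustBinaryValueLoop_eq (s : List Char) :
    adjustBinaryValueLoop 3 s s.reverse = List.replicate ((3 - s.length % 3) % 3) '0' ++ s := by
  have hstep : (s.reverse ++ ['0']).reverse = '0' :: s := by simp
  have hlt : s.length % 3 < 3 := Nat.mod_lt _ (by omega)
  rcases (by omega : s.length % 3 = 0 ∨ s.length % 3 = 1 ∨ s.length % 3 = 2) with h | h | h
  · simp [adjustBinaryValueLoop, h]
  · have h1 : ('0' :: s).length % 3 = 2 := by simp [Nat.add_mod, h]
    have hstep2 : (s.reverse ++ ['0'] ++ ['0']).reverse = '0' :: '0' :: s := by simp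
    have h2 : ('0' :: '0' :: s).length % 3 = 0 := by simp [Nat.add_mod, h]
    simp only [adjustBinaryValueLoop, hstep, hstep2, h, h1, h2]
    norm_num
    rfl
  · have h1 : ('0' :: s).length % 3 = 0 := by simp [Nat.add_mod, h]
    simp only [adjustBinaryValueLoop, hstep, h, h1]
    norm_num

theorem pad_eq (n : Nat) : (PySem.Int.mod (-(n : Int)) 3).toNat = (3 - n % 3) % 3 := by
  rw [PySem.Int.mod_eq_emod_of_pos]
  · omega
  · omega

-- ===== VERDICT (by name: the statement is the Claim_ definition above) =====
theorem adjustBinaryValue_spec : Claim_equal_adjustBinaryValue := by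
  intro value _
  show _ = _
  unfold adjustBinaryValue adjustBinaryValue_alt
  simp only [adjustBinaryValueLoop_eq, pad_eq, List.map_append, List.map_replicate]
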